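-- pv_equiv track=rewrite | github.com/sriramreddy-7/Summer-Training-SRU | DAY_12/list.py | rec
-- ===== SOURCE A (Python) =====
-- def rec(n,m):
--     i=0
--     r=[]
--     final=[]
--     while i<len(n):
--         if n[i]%2==0:
--             j=0
--             while j<len(m):
--                 if m[j]%2!=0:
--                     r.append(n[i]+m[j])
--                 j=j+1
--             result=sum(r)
--             final.append(result)
--             r = []
--         i=i+1
--     return final
-- ===== SOURCE B (Python) =====
-- def rec(n, m):
--     odds = [y for y in m if y % 2 != 0]
--     c = len(odds)
--     s = sum(odds)
--     return [x * c + s for x in n if x % 2 == 0]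
-- ===== Notes on version B (the rewrite author's own statement) =====
-- stated objective: faster
-- what changed: Precompute the count and sum of odd elements of m once, then emit n[i]*count+sum per even element instead of rescanning m for every even n[i].
import Mathlib
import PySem

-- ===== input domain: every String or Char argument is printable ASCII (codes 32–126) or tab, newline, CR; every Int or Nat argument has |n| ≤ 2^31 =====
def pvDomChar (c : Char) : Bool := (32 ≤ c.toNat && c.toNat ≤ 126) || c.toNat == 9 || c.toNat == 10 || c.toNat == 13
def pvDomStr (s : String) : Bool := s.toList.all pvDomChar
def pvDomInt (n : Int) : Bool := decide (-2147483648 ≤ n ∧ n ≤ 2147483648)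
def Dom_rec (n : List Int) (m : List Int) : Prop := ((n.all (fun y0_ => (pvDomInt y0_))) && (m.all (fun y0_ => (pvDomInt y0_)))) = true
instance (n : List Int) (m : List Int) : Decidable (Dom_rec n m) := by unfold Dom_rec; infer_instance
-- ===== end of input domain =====

-- B replaces A's inner rescan of m by a once-precomputed odd count and odd sum (faster, asymptotic).

-- ===== PORT A =====
-- inner while loop over m: collects n[i]+m[j] for odd m[j] (the list r)
def recInnerR (x : Int) : List Int → List Int
  | [] => []
  | y :: t => if y % 2 ≠ 0 then (x + y) :: recInnerR x t else recInnerR x t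

-- outer while loop over n: for even n[i], append sum(r)
def rec (n : List Int) (m : List Int) : List Int :=
  match n with
  | [] => []
  | x :: t => if x % 2 == 0 then (recInnerR x m).sum :: rec t m else rec t m

-- ===== PORT B =====
def rec_alt (n : List Int) (m : List Int) : List Int :=
  let odds := m.filter (fun y => y % 2 != 0)
  let c : Int := odds.length
  let s : Int := odds.sum
  (n.filter (fun x => x % 2 == 0)).map (fun x => x * c + s)

-- ===== PRECONDITION & SPEC =====
def Spec_rec (n : List Int) (m : List Int) (out : List Int) : Prop := out = rec_alt n m
instance (n : List Int) (m : List Int) (out : List Int) : Decidable (Spec_rec n m out) := by unfold Spec_rec; infer_instance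

-- ===== CLAIM (what is proved, stated in full; the proofs are below) =====
def Claim_equal_rec : Prop := ∀ (n : List Int) (m : List Int), Dom_rec n m → Spec_rec n m (rec n m)

-- ===== LEMMAS AND PROOFS =====
theorem recInnerR_sum (x : Int) (m : List Int) :
    (recInnerR x m).sum =
      x * ((m.filter (fun y => y % 2 != 0)).length : Int) + (m.filter (fun y => y % 2 != 0)).sum := by
  induction m with
  | nil => simp [recInnerR]
  | cons y t ih =>
    by_cases h : y % 2 ≠ 0
    · simp [recInnerR, h, ih]
      ring
    · simp [recInnerR, h, ih]

theorem rec_eq_alt (n m : List Int) : rec n m = rec_alt n m := by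
  induction n with
  | nil => simp [rec, rec_alt]
  | cons x t ih =>
    by_cases h : x % 2 = 0
    · simp [rec, rec_alt, h, recInnerR_sum]
      simpa [rec_alt] using ih
    · simp [rec, rec_alt, h]
      simpa [rec_alt] using ih

-- ===== VERDICT (by name: the statement is the Claim_ definition above) =====
theorem rec_spec : Claim_equal_rec := by
  intro n m _
  unfold Spec_rec
  exact rec_eq_alt n m
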